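-- pv_equiv track=rewrite | github.com/thiagopelizoni/MathChallenges | src/problem_212.py | cuboids
-- ===== SOURCE A (Python) =====
-- def cuboids(n):
--     s = [0] * (6 * n + 1)
--
--     for k in range(1, min(55, 6 * n) + 1):
--         s[k] = (100003 - 200003 * k + 300007 * k**3) % 1_000_000
--     for k in range(56, 6 * n + 1):
--         s[k] = (s[k - 24] + s[k - 55]) % 1_000_000
--
--     cubes = []
--     for i in range(n):
--         j = 6 * i + 1
--         x = s[j] % 10000
--         y = s[j + 1] % 10000
--         z = s[j + 2] % 10000
--         dx = 1 + s[j + 3] % 399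
--         dy = 1 + s[j + 4] % 399
--         dz = 1 + s[j + 5] % 399
--         cubes.append((x, x + dx, y, y + dy, z, z + dz))
--
--     return cubes
-- ===== SOURCE B (Python) =====
-- def cuboids(n):
--     # Streaming lagged-Fibonacci: keep only a rolling window of the last 55
--     # terms instead of precomputing the whole 6n+1 array.
--     out = []
--     buf = []          # at most the last 55 terms of the sequence
--     k = 0
--     for _ in range(n):
--         vals = []
--         for _ in range(6):
--             k += 1
--             if k <= 55:
--                 t = (100003 - 200003 * k + 300007 * k ** 3) % 1_000_000
--             else:
--                 t = (buf[-24] + buf[-55]) % 1_000_000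
--             buf.append(t)
--             if len(buf) > 55:
--                 del buf[0]
--             vals.append(t)
--         v1, v2, v3, v4, v5, v6 = vals
--         x, y, z = v1 % 10000, v2 % 10000, v3 % 10000
--         dx, dy, dz = 1 + v4 % 399, 1 + v5 % 399, 1 + v6 % 399
--         out.append((x, x + dx, y, y + dy, z, z + dz))
--     return out
-- ===== Notes on version B (the rewrite author's own statement) =====
-- stated objective: alternative
-- what changed: B streams the lagged-Fibonacci terms through a rolling fixed-size window (negative-lag lookups from the end of the window) and emits each cuboid as soon as its six terms appear, instead of A's full precomputed array indexed by absolute position in three separate passes.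
import Mathlib
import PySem

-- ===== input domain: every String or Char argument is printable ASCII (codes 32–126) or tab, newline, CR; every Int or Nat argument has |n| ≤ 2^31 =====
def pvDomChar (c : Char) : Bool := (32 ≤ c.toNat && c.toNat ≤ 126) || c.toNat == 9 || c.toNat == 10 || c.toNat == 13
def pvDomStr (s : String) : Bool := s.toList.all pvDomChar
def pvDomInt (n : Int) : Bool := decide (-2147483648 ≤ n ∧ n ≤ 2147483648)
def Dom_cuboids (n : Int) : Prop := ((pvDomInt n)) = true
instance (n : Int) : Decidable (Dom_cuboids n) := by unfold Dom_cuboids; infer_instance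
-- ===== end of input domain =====

-- B streams the lagged-Fibonacci terms through a rolling fixed-size window and emits each
-- cuboid as soon as its six terms appear, instead of A's full precomputed array in three passes
-- (objective: alternative decomposition, O(1) extra space; same running time).

-- ===== PORT A =====
def cuboids (n : Int) : List (List Int) :=
  let s0 : List Int := List.replicate (6 * n + 1).toNat 0
  let s1 := (PySem.List.pyRange 1 (min 55 (6 * n) + 1) 1).foldl
    (fun s k => s.set k.toNat (PySem.Int.mod (100003 - 200003 * k + 300007 * k ^ 3) 1000000)) s0
  let s2 := (PySem.List.pyRange 56 (6 * n + 1) 1).foldl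
    (fun s k => s.set k.toNat
      (PySem.Int.mod (PySem.List.pyGetD s (k - 24) 0 + PySem.List.pyGetD s (k - 55) 0) 1000000)) s1
  (PySem.List.pyRange 0 n 1).foldl
    (fun cubes i =>
      let j := 6 * i + 1
      let x := PySem.Int.mod (PySem.List.pyGetD s2 j 0) 10000
      let y := PySem.Int.mod (PySem.List.pyGetD s2 (j + 1) 0) 10000
      let z := PySem.Int.mod (PySem.List.pyGetD s2 (j + 2) 0) 10000
      let dx := 1 + PySem.Int.mod (PySem.List.pyGetD s2 (j + 3) 0) 399
      let dy := 1 + PySem.Int.mod (PySem.List.pyGetD s2 (j + 4) 0) 399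
      let dz := 1 + PySem.Int.mod (PySem.List.pyGetD s2 (j + 5) 0) 399
      cubes ++ [[x, x + dx, y, y + dy, z, z + dz]]) []

-- ===== PORT B =====
-- one streamed term: advance k, compute it from the window's lags -24/-55, slide the window
def bTerm (st : Int × List Int) : (Int × List Int) × Int :=
  let k := st.1 + 1
  let buf := st.2
  let t := if k ≤ 55 then PySem.Int.mod (100003 - 200003 * k + 300007 * k ^ 3) 1000000
           else PySem.Int.mod (PySem.List.pyGetD buf (-24) 0 + PySem.List.pyGetD buf (-55) 0) 1000000
  let buf := buf ++ [t]
  let buf := if buf.length > 55 then buf.drop 1 else buf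
  ((k, buf), t)

-- the inner 'for _ in range(6)': collect the six values of one cuboid
def bGroup (k : Int) (buf : List Int) : Int × List Int × List Int :=
  (List.range 6).foldl (fun st _ =>
    let r := bTerm (st.1, st.2.1)
    (r.1.1, r.1.2, st.2.2 ++ [r.2])) (k, buf, [])

def bCube (vals : List Int) : List Int :=
  match vals with
  | [v1, v2, v3, v4, v5, v6] =>
    let x := PySem.Int.mod v1 10000
    let y := PySem.Int.mod v2 10000
    let z := PySem.Int.mod v3 10000
    let dx := 1 + PySem.Int.mod v4 399
    let dy := 1 + PySem.Int.mod v5 399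
    let dz := 1 + PySem.Int.mod v6 399
    [x, x + dx, y, y + dy, z, z + dz]
  | _ => []

def bLoop : Nat → Int → List Int → List (List Int) → List (List Int)
  | 0, _, _, out => out
  | m + 1, k, buf, out =>
    let r := bGroup k buf
    bLoop m r.1 r.2.1 (out ++ [bCube r.2.2])

def cuboids_alt (n : Int) : List (List Int) := bLoop n.toNat 0 [] []

-- ===== PRECONDITION & SPEC =====
def Spec_cuboids (n : Int) (out : List (List Int)) : Prop := out = cuboids_alt n
instance (n : Int) (out : List (List Int)) : Decidable (Spec_cuboids n out) := by unfold Spec_cuboids; infer_instance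

-- ===== CLAIM (what is proved, stated in full; the proofs are below) =====
def Claim_equal_cuboids : Prop := ∀ (n : Int), Dom_cuboids n → Spec_cuboids n (cuboids n)

-- ===== LEMMAS AND PROOFS =====

-- the first-pass closed formula
def fV (j : Nat) : Int :=
  PySem.Int.mod (100003 - 200003 * (j : Int) + 300007 * (j : Int) ^ 3) 1000000

-- the mathematical lagged-Fibonacci sequence both programs compute (1-based)
def S (k : Nat) : Int :=
  if k ≤ 55 then fV k
  else PySem.Int.mod (S (k - 24) + S (k - 55)) 1000000
termination_by k
decreasing_by all_goals omega

-- the cuboid made from six consecutive sequence values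
def cube (j : Nat) : List Int := bCube [S j, S (j+1), S (j+2), S (j+3), S (j+4), S (j+5)]

def specOut (N : Nat) : List (List Int) := (List.range N).map (fun r => cube (6 * r + 1))

-- the rolling window after K terms: the last min K 55 values S (K-min K 55 + 1) .. S K
def W (K : Nat) : List Int := (List.range' (K + 1 - min K 55) (min K 55)).map S

theorem W_length (K : Nat) : (W K).length = min K 55 := by
  simp [W]


theorem S_eq_fV {k : Nat} (h : k ≤ 55) : S k = fV k := by
  rw [S]; simp [h]

theorem S_eq_rec {k : Nat} (h : 56 ≤ k) :
    S k = PySem.Int.mod (S (k - 24) + S (k - 55)) 1000000 := by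
  rw [S]; simp [Nat.not_le.mpr (by omega : 55 < k)]

theorem bTerm_spec (K : Nat) :
    bTerm ((K : Int), W K) = ((((K + 1 : Nat) : Int), W (K + 1)), S (K + 1)) := by
  by_cases h : K ≤ 54
  · -- small case: formula branch, window grows
    have hb : ((K : Int) + 1 ≤ 55) := by omega
    have hmin : min K 55 = K := by omega
    have hmin' : min (K+1) 55 = K + 1 := by omega
    have ht : S (K+1) = PySem.Int.mod (100003 - 200003 * ((K:Int)+1) + 300007 * ((K:Int)+1) ^ 3) 1000000 := by
      rw [S_eq_fV (by omega)]; unfold fV; push_cast; ring_nf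
    have hlen : (W K).length = K := by rw [W_length, hmin]
    simp only [bTerm, hb, if_true, ← ht]
    have hlen2 : ¬ ((W K ++ [S (K+1)]).length > 55) := by
      simp [hlen]; omega
    simp only [hlen2, if_false]
    simp only [Prod.mk.injEq]
    refine ⟨⟨by push_cast; ring, ?_⟩, trivial⟩
    unfold W
    rw [hmin, hmin']
    have h1 : K + 1 - K = 1 := by omega
    have h2 : K + 1 + 1 - (K+1) = 1 := by omega
    rw [h1, h2, List.range'_concat, List.map_append]
    simp [Nat.add_comm]
  · -- recurrence branch: window is full (length 55) and slides
    have hK : 55 ≤ K := by omega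
    have hb : ¬ ((K : Int) + 1 ≤ 55) := by omega
    have hmin : min K 55 = 55 := by omega
    have hW : W K = (List.range' (K + 1 - 55) 55).map S := by unfold W; rw [hmin]
    have hlen : (W K).length = 55 := by rw [W_length, hmin]
    have hget24 : PySem.List.pyGetD (W K) (-24) 0 = S (K - 23) := by
      rw [hW, PySem.List.pyGetD_neg_ofNat _ 24 0 (by omega) (by simp)]
      simp [List.getElem_range']
      congr 1
      omega
    have hget55 : PySem.List.pyGetD (W K) (-55) 0 = S (K - 54) := by
      rw [hW, PySem.List.pyGetD_neg_ofNat _ 55 0 (by omega) (by simp)]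
      simp [List.getElem_range']
    have ht : S (K+1) = PySem.Int.mod (S (K - 23) + S (K - 54)) 1000000 := by
      rw [S_eq_rec (by omega)]
      congr 2
    simp only [bTerm, hb, if_false, hget24, hget55, ← ht]
    have hlen2 : ((W K ++ [S (K+1)]).length > 55) := by simp [hlen]
    simp only [hlen2, if_true]
    simp only [Prod.mk.injEq]
    refine ⟨⟨by push_cast; ring, ?_⟩, trivial⟩
    rw [hW]
    unfold W
    have hmin' : min (K+1) 55 = 55 := by omega
    rw [hmin']
    have hc : List.range' (K + 1 - 55) 55 = (K + 1 - 55) :: List.range' (K + 1 - 55 + 1) 54 := by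
      rw [List.range'_succ]
    rw [hc, List.map_cons, List.cons_append, List.drop_one, List.tail_cons]
    have h54 : List.range' (K + 1 + 1 - 55) 55 = List.range' (K + 1 - 55 + 1) 54 ++ [K + 1] := by
      have he : K + 1 + 1 - 55 = K + 1 - 55 + 1 := by omega
      rw [he, List.range'_concat]
      congr 1
      simp
      omega
    rw [h54, List.map_append]
    simp

theorem bGroup_spec (K : Nat) :
    bGroup (K : Int) (W K) =
      (((K + 6 : Nat) : Int), W (K + 6),
        [S (K+1), S (K+2), S (K+3), S (K+4), S (K+5), S (K+6)]) := by
  have hr : List.range 6 = [0,1,2,3,4,5] := by decide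
  simp only [bGroup, hr, List.foldl_cons, List.foldl_nil]
  simp only [bTerm_spec K]
  simp only [bTerm_spec (K+1)]
  simp only [bTerm_spec (K+2)]
  simp only [bTerm_spec (K+3)]
  simp only [bTerm_spec (K+4)]
  simp only [bTerm_spec (K+5)]
  simp
  omega

theorem bLoop_spec (m : Nat) : ∀ (K : Nat) (acc : List (List Int)),
    bLoop m (K : Int) (W K) acc
      = acc ++ (List.range m).map (fun r => cube (K + 6 * r + 1)) := by
  induction m with
  | zero => intro K acc; simp [bLoop]
  | succ m ih =>
    intro K acc
    rw [bLoop]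
    simp only [bGroup_spec K]
    rw [ih (K + 6)]
    rw [List.append_assoc, List.singleton_append]
    congr 1
    rw [List.range_succ_eq_map, List.map_cons, List.map_map]
    congr 1
    · apply List.map_congr_left
      intro r _
      simp only [Function.comp]
      congr 1
      omega

theorem alt_eq_spec (n : Int) : cuboids_alt n = specOut n.toNat := by
  unfold cuboids_alt specOut
  have h0 : (0 : Int) = ((0 : Nat) : Int) := by simp
  have hW0 : ([] : List Int) = W 0 := by simp [W]
  rw [h0, hW0, bLoop_spec n.toNat 0 []]
  simp only [List.nil_append]
  apply List.map_congr_left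
  intro r _
  congr 1
  omega

theorem loop1_spec (M : Nat) (s : List Int) :
    (((PySem.List.pyRange 1 ((M : Int) + 1) 1).foldl
      (fun s k => s.set k.toNat (PySem.Int.mod (100003 - 200003 * k + 300007 * k ^ 3) 1000000)) s).length = s.length)
    ∧ ∀ j : Nat,
      ((PySem.List.pyRange 1 ((M : Int) + 1) 1).foldl
        (fun s k => s.set k.toNat (PySem.Int.mod (100003 - 200003 * k + 300007 * k ^ 3) 1000000)) s)[j]?
        = if 1 ≤ j ∧ j ≤ M ∧ j < s.length then some (fV j) else s[j]? := by
  induction M with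
  | zero =>
    rw [PySem.List.pyRange_one_eq_nil (by norm_num)]
    refine ⟨rfl, fun j => ?_⟩
    exact (if_neg (by omega : ¬(1 ≤ j ∧ j ≤ 0 ∧ j < s.length))).symm
  | succ M ih =>
    have hsplit : PySem.List.pyRange 1 (((M + 1 : Nat) : Int) + 1) 1
        = PySem.List.pyRange 1 ((M : Int) + 1) 1 ++ [(M : Int) + 1] := by
      have h : ((M + 1 : Nat) : Int) + 1 = ((M : Int) + 1) + 1 := by push_cast; ring
      rw [h, PySem.List.pyRange_one_succ_right (by omega)]
    rw [hsplit, List.foldl_append]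
    obtain ⟨ihlen, ihget⟩ := ih
    simp only [List.foldl_cons, List.foldl_nil]
    have htoNat : ((M : Int) + 1).toNat = M + 1 := by omega
    have hval : PySem.Int.mod (100003 - 200003 * ((M : Int) + 1) + 300007 * ((M : Int) + 1) ^ 3) 1000000
        = fV (M + 1) := by
      unfold fV; push_cast; ring_nf
    rw [htoNat, hval]
    refine ⟨by rw [List.length_set, ihlen], fun j => ?_⟩
    rw [List.getElem?_set]
    by_cases hj : M + 1 = j
    · subst hj
      by_cases hlt : M + 1 < s.length
      · have hlt' : M + 1 < (List.foldl
            (fun s k => s.set k.toNat (PySem.Int.mod (100003 - 200003 * k + 300007 * k ^ 3) 1000000)) s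
            (PySem.List.pyRange 1 ((M : Int) + 1) 1)).length := by rw [ihlen]; exact hlt
        rw [if_pos rfl, if_pos hlt',
          if_pos (show 1 ≤ M + 1 ∧ M + 1 ≤ M + 1 ∧ M + 1 < s.length by omega)]
      · have hlt' : ¬ M + 1 < (List.foldl
            (fun s k => s.set k.toNat (PySem.Int.mod (100003 - 200003 * k + 300007 * k ^ 3) 1000000)) s
            (PySem.List.pyRange 1 ((M : Int) + 1) 1)).length := by rw [ihlen]; exact hlt
        rw [if_pos rfl, if_neg hlt',
          if_neg (show ¬(1 ≤ M + 1 ∧ M + 1 ≤ M + 1 ∧ M + 1 < s.length) by omega)]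
        exact (List.getElem?_eq_none (by omega)).symm
    · rw [if_neg hj, ihget j]
      by_cases hc : 1 ≤ j ∧ j ≤ M ∧ j < s.length
      · rw [if_pos hc, if_pos (show 1 ≤ j ∧ j ≤ M + 1 ∧ j < s.length by omega)]
      · rw [if_neg hc, if_neg (show ¬(1 ≤ j ∧ j ≤ M + 1 ∧ j < s.length) by omega)]

theorem loop2_spec (N : Nat) (M : Nat) (h55 : 55 ≤ M) (hM : M ≤ 6 * N)
    (s : List Int) (hlen : s.length = 6 * N + 1)
    (H : ∀ j : Nat, 1 ≤ j → j ≤ 55 → s[j]? = some (S j)) :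
    (((PySem.List.pyRange 56 ((M : Int) + 1) 1).foldl
      (fun s k => s.set k.toNat
        (PySem.Int.mod (PySem.List.pyGetD s (k - 24) 0 + PySem.List.pyGetD s (k - 55) 0) 1000000)) s).length
      = s.length)
    ∧ ∀ j : Nat, 1 ≤ j → j ≤ M →
      ((PySem.List.pyRange 56 ((M : Int) + 1) 1).foldl
        (fun s k => s.set k.toNat
          (PySem.Int.mod (PySem.List.pyGetD s (k - 24) 0 + PySem.List.pyGetD s (k - 55) 0) 1000000)) s)[j]?
        = some (S j) := by
  induction M, h55 using Nat.le_induction with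
  | base =>
    have hnil : PySem.List.pyRange 56 (((55 : Nat) : Int) + 1) 1 = [] := by
      apply PySem.List.pyRange_one_eq_nil; norm_num
    rw [hnil]
    refine ⟨rfl, fun j h1 h2 => ?_⟩
    exact H j h1 h2
  | succ M hM55 ih =>
    have hsplit : PySem.List.pyRange 56 (((M + 1 : Nat) : Int) + 1) 1
        = PySem.List.pyRange 56 ((M : Int) + 1) 1 ++ [(M : Int) + 1] := by
      have h : ((M + 1 : Nat) : Int) + 1 = ((M : Int) + 1) + 1 := by push_cast; ring
      rw [h, PySem.List.pyRange_one_succ_right (by omega)]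
    rw [hsplit, List.foldl_append]
    obtain ⟨ihlen, ihget⟩ := ih (by omega)
    simp only [List.foldl_cons, List.foldl_nil]
    have htoNat : ((M : Int) + 1).toNat = M + 1 := by omega
    have hi24 : (M : Int) + 1 - 24 = ((M - 23 : Nat) : Int) := by omega
    have hi55 : (M : Int) + 1 - 55 = ((M - 54 : Nat) : Int) := by omega
    have hg24 : PySem.List.pyGetD
        ((PySem.List.pyRange 56 ((M : Int) + 1) 1).foldl
          (fun s k => s.set k.toNat
            (PySem.Int.mod (PySem.List.pyGetD s (k - 24) 0 + PySem.List.pyGetD s (k - 55) 0) 1000000)) s)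
        ((M : Int) + 1 - 24) 0 = S (M - 23) := by
      rw [hi24, PySem.List.pyGetD_natCast, List.getD_eq_getElem?_getD,
        ihget (M - 23) (by omega) (by omega)]
      rfl
    have hg55 : PySem.List.pyGetD
        ((PySem.List.pyRange 56 ((M : Int) + 1) 1).foldl
          (fun s k => s.set k.toNat
            (PySem.Int.mod (PySem.List.pyGetD s (k - 24) 0 + PySem.List.pyGetD s (k - 55) 0) 1000000)) s)
        ((M : Int) + 1 - 55) 0 = S (M - 54) := by
      rw [hi55, PySem.List.pyGetD_natCast, List.getD_eq_getElem?_getD,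
        ihget (M - 54) (by omega) (by omega)]
      rfl
    have hval : PySem.Int.mod (S (M - 23) + S (M - 54)) 1000000 = S (M + 1) := by
      rw [S_eq_rec (by omega : 56 ≤ M + 1)]
      congr 2
    rw [hg24, hg55, hval, htoNat]
    refine ⟨by rw [List.length_set, ihlen], fun j h1 h2 => ?_⟩
    rw [List.getElem?_set]
    by_cases hj : M + 1 = j
    · subst hj
      rw [if_pos rfl, if_pos (by rw [ihlen, hlen]; omega)]
    · rw [if_neg hj]
      exact ihget j h1 (by omega)

theorem s2_spec (N : Nat) (hN : 1 ≤ N) :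
    (((PySem.List.pyRange 56 (((6 * N : Nat) : Int) + 1) 1).foldl
      (fun s k => s.set k.toNat
        (PySem.Int.mod (PySem.List.pyGetD s (k - 24) 0 + PySem.List.pyGetD s (k - 55) 0) 1000000))
      ((PySem.List.pyRange 1 (((min 55 (6 * N) : Nat) : Int) + 1) 1).foldl
        (fun s k => s.set k.toNat (PySem.Int.mod (100003 - 200003 * k + 300007 * k ^ 3) 1000000))
        (List.replicate (6 * N + 1) (0 : Int)))).length = 6 * N + 1)
    ∧ ∀ j : Nat, 1 ≤ j → j ≤ 6 * N →
      ((PySem.List.pyRange 56 (((6 * N : Nat) : Int) + 1) 1).foldl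
        (fun s k => s.set k.toNat
          (PySem.Int.mod (PySem.List.pyGetD s (k - 24) 0 + PySem.List.pyGetD s (k - 55) 0) 1000000))
        ((PySem.List.pyRange 1 (((min 55 (6 * N) : Nat) : Int) + 1) 1).foldl
          (fun s k => s.set k.toNat (PySem.Int.mod (100003 - 200003 * k + 300007 * k ^ 3) 1000000))
          (List.replicate (6 * N + 1) (0 : Int))))[j]? = some (S j) := by
  obtain ⟨h1len, h1get⟩ := loop1_spec (min 55 (6 * N)) (List.replicate (6 * N + 1) (0 : Int))
  have hs1len : ((PySem.List.pyRange 1 (((min 55 (6 * N) : Nat) : Int) + 1) 1).foldl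
      (fun s k => s.set k.toNat (PySem.Int.mod (100003 - 200003 * k + 300007 * k ^ 3) 1000000))
      (List.replicate (6 * N + 1) (0 : Int))).length = 6 * N + 1 := by
    rw [h1len, List.length_replicate]
  have hs1get : ∀ j : Nat, 1 ≤ j → j ≤ min 55 (6 * N) →
      ((PySem.List.pyRange 1 (((min 55 (6 * N) : Nat) : Int) + 1) 1).foldl
        (fun s k => s.set k.toNat (PySem.Int.mod (100003 - 200003 * k + 300007 * k ^ 3) 1000000))
        (List.replicate (6 * N + 1) (0 : Int)))[j]? = some (S j) := by
    intro j hj1 hj2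
    rw [h1get j, if_pos (show 1 ≤ j ∧ j ≤ min 55 (6 * N) ∧ j < (List.replicate (6 * N + 1) (0 : Int)).length by
      refine ⟨hj1, hj2, ?_⟩; rw [List.length_replicate]; omega)]
    rw [S_eq_fV (by omega : j ≤ 55)]
  by_cases hbig : 6 * N ≤ 55
  · have hnil : PySem.List.pyRange 56 (((6 * N : Nat) : Int) + 1) 1 = [] :=
      PySem.List.pyRange_one_eq_nil (by push_cast; omega)
    rw [hnil]
    refine ⟨hs1len, fun j hj1 hj2 => ?_⟩
    exact hs1get j hj1 (by omega)
  · have hminEq : min 55 (6 * N) = 55 := by omega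
    rw [hminEq] at hs1len hs1get ⊢
    obtain ⟨h2len, h2get⟩ := loop2_spec N (6 * N) (by omega) le_rfl _ hs1len
      (fun j a b => hs1get j a (by omega))
    exact ⟨by rw [h2len, hs1len], h2get⟩

theorem a_eq_spec (n : Int) : cuboids n = specOut n.toNat := by
  by_cases hn : n ≤ 0
  · have h1 : PySem.List.pyRange 0 n 1 = [] := PySem.List.pyRange_one_eq_nil (by omega)
    have h2 : n.toNat = 0 := by omega
    simp [cuboids, specOut, h1, h2]
  · have hn1 : 1 ≤ n.toNat := by omega
    set N := n.toNat with hN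
    have hcast : (N : Int) = n := by omega
    rw [show cuboids n = cuboids ((N : Int)) by rw [hcast]]
    simp only [cuboids]
    rw [show (6 * ((N : Nat) : Int) + 1) = ((6 * N : Nat) : Int) + 1 by push_cast; ring]
    rw [show (((6 * N : Nat) : Int) + 1).toNat = 6 * N + 1 by omega]
    rw [show (min 55 (6 * ((N : Nat) : Int)) + 1) = ((min 55 (6 * N) : Nat) : Int) + 1 by push_cast; ring]
    obtain ⟨hs2len, hs2get⟩ := s2_spec N hn1
    rw [PySem.List.foldl_append_singleton_eq_map, List.nil_append]
    rw [PySem.List.pyRange_one 0 ((N : Nat) : Int), List.map_map]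
    rw [show ((N : Int) - 0).toNat = N by omega]
    unfold specOut
    apply List.map_congr_left
    intro i hi
    have hiN : i < N := List.mem_range.mp hi
    simp only [Function.comp]
    rw [show (6 * ((0 : Int) + (i : Nat)) + 1) = ((6 * i + 1 : Nat) : Int) by push_cast; ring]
    rw [show ((6 * i + 1 : Nat) : Int) + 1 = ((6 * i + 2 : Nat) : Int) by push_cast; ring]
    rw [show ((6 * i + 1 : Nat) : Int) + 2 = ((6 * i + 3 : Nat) : Int) by push_cast; ring]
    rw [show ((6 * i + 1 : Nat) : Int) + 3 = ((6 * i + 4 : Nat) : Int) by push_cast; ring]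
    rw [show ((6 * i + 1 : Nat) : Int) + 4 = ((6 * i + 5 : Nat) : Int) by push_cast; ring]
    rw [show ((6 * i + 1 : Nat) : Int) + 5 = ((6 * i + 6 : Nat) : Int) by push_cast; ring]
    simp only [PySem.List.pyGetD_natCast, List.getD_eq_getElem?_getD]
    rw [hs2get (6 * i + 1) (by omega) (by omega), hs2get (6 * i + 2) (by omega) (by omega),
      hs2get (6 * i + 3) (by omega) (by omega), hs2get (6 * i + 4) (by omega) (by omega),
      hs2get (6 * i + 5) (by omega) (by omega), hs2get (6 * i + 6) (by omega) (by omega)]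
    simp only [Option.getD_some]
    unfold cube bCube
    rfl

-- ===== VERDICT (by name: the statement is the Claim_ definition above) =====
theorem cuboids_spec : Claim_equal_cuboids := by
  intro n _
  unfold Spec_cuboids
  rw [a_eq_spec, alt_eq_spec]
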